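-- pv_equiv track=rewrite | github.com/Aasthaengg/IBMdataset | Python_codes/p02833/s824653030.py | solve
-- ===== SOURCE A (Python) =====
-- def solve(N):
--     if N % 2:
--         return 0
--     ans, d = 0, 10
--     while True:
--         q = N // d
--         ans += q
--         if q == 0:
--             return ans
--         d *= 5
-- ===== SOURCE B (Python) =====
-- def _fives(m):
--     # number of factors 5 in m! , by shrinking quotients: m//5 + m//25 + ...
--     if m <= 0:
--         return 0
--     q = m // 5
--     return q + _fives(q)
--
--
-- def solve(N):
--     if N % 2:
--         return 0
--     return _fives(N // 2)
-- ===== Notes on version B (the rewrite author's own statement) =====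
-- stated objective: simpler
-- what changed: B replaces A's growing-divisor while-loop (d = 10, 50, 250, ... summing N//d) by first halving N and then a short recursion on the shrinking quotient m -> m//5 that counts the factors 5 of (N/2)!, which equals the number of trailing zeros of N!!.
-- outside the precondition, e.g. on solve(-2): A does not finish within the time limit, B returns 0
import Mathlib
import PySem

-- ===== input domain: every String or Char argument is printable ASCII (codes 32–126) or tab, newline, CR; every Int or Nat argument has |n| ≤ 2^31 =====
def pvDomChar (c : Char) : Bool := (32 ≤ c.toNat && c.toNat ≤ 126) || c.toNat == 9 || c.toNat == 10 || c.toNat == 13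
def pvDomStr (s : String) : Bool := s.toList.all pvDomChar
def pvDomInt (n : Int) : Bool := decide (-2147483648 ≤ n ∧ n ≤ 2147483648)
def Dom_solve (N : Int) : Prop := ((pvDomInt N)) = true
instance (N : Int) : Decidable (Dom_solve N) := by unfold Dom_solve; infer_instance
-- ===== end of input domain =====

-- B changes the decomposition (halve, then recurse on the shrinking quotient m//5) instead of
-- A's growing-divisor while-loop; same cost, plainer shape.  Equivalence of the RETURN values.

-- ===== PORT A =====
-- A's 'while True' loop; the fuel argument only makes the recursion total in Lean
-- (under Pre_solve the loop always returns before the fuel runs out).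
def solveLoop : Nat → Int → Int → Int → Int
  | 0, _, ans, _ => ans
  | fuel + 1, N, ans, d =>
    let q := PySem.Int.floordiv N d
    let ans' := ans + q
    if q = 0 then ans' else solveLoop fuel N ans' (d * 5)

def solve (N : Int) : Int :=
  if PySem.Int.mod N 2 ≠ 0 then 0
  else solveLoop (N.natAbs + 1) N 0 10

-- ===== PORT B =====
def fives (m : Int) : Int :=
  if _h : m ≤ 0 then 0
  else
    let q := PySem.Int.floordiv m 5
    q + fives q
termination_by m.toNat
decreasing_by
  rw [PySem.Int.floordiv_eq_ediv_of_pos (by norm_num)]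
  omega

def solve_alt (N : Int) : Int :=
  if PySem.Int.mod N 2 ≠ 0 then 0
  else fives (PySem.Int.floordiv N 2)

-- ===== PRECONDITION & SPEC =====
-- Pre_ excludes negative even N, on which A's loop never terminates (q = N // d stays negative).
def Pre_solve (N : Int) : Prop := ¬ (2 ∣ N) ∨ 0 ≤ N
instance (N : Int) : Decidable (Pre_solve N) := by unfold Pre_solve; infer_instance
def pvWitness_solve : Int := (30)
def Spec_solve (N : Int) (out : Int) : Prop := out = solve_alt N
instance (N : Int) (out : Int) : Decidable (Spec_solve N out) := by unfold Spec_solve; infer_instance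

-- ===== CLAIM (what is proved, stated in full; the proofs are below) =====
def Claim_equal_solve : Prop := ∀ (N : Int), Dom_solve N → Pre_solve N → Spec_solve N (solve N)

-- ===== LEMMAS AND PROOFS =====

theorem fives_zero : fives 0 = 0 := by rw [fives]; simp

theorem fives_pos (m : Int) (hm : 0 < m) :
    fives m = PySem.Int.floordiv m 5 + fives (PySem.Int.floordiv m 5) := by
  rw [fives]; simp [not_le.mpr hm]

theorem floordiv_floordiv (N a b : Int) (ha : 0 < a) (hb : 0 < b) :
    PySem.Int.floordiv (PySem.Int.floordiv N a) b = PySem.Int.floordiv N (a * b) := by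
  rw [PySem.Int.floordiv_eq_ediv_of_pos ha, PySem.Int.floordiv_eq_ediv_of_pos hb,
      PySem.Int.floordiv_eq_ediv_of_pos (by positivity)]
  exact Int.ediv_ediv_of_nonneg (le_of_lt ha)

-- loop invariant: with enough fuel, the loop from divisor d adds q + fives q, q = N // d
theorem solveLoop_eq (fuel : Nat) : ∀ (N ans d : Int), 0 ≤ N → 0 < d → N < d * 5 ^ fuel →
    solveLoop (fuel + 1) N ans d
      = ans + PySem.Int.floordiv N d + fives (PySem.Int.floordiv N d) := by
  induction fuel with
  | zero =>
    intro N ans d hN hd hlt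
    have hq : PySem.Int.floordiv N d = 0 := by
      rw [PySem.Int.floordiv_eq_ediv_of_pos hd]
      apply Int.ediv_eq_zero_of_lt hN
      simpa using hlt
    simp [solveLoop, hq, fives_zero]
  | succ fuel ih =>
    intro N ans d hN hd hlt
    by_cases hq : PySem.Int.floordiv N d = 0
    · simp [solveLoop, hq, fives_zero]
    · have hqpos : 0 < PySem.Int.floordiv N d := by
        have : 0 ≤ PySem.Int.floordiv N d := by
          rw [PySem.Int.floordiv_eq_ediv_of_pos hd]; exact Int.ediv_nonneg hN (le_of_lt hd)
        omega
      have hlt' : N < d * 5 * 5 ^ fuel := by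
        have : d * 5 ^ (fuel + 1) = d * 5 * 5 ^ fuel := by ring
        linarith [this ▸ hlt]
      have hrec := ih N (ans + PySem.Int.floordiv N d) (d * 5) hN (by positivity) hlt'
      rw [show solveLoop (fuel + 1 + 1) N ans d
            = solveLoop (fuel + 1) N (ans + PySem.Int.floordiv N d) (d * 5) by
          simp [solveLoop, hq]]
      rw [hrec, fives_pos _ hqpos, floordiv_floordiv N d 5 hd (by norm_num)]
      ring

theorem nat_lt_pow5 (n : Nat) : n < 5 ^ n :=
  Nat.lt_pow_self (by norm_num)

-- ===== VERDICT (by name: the statement is the Claim_ definition above) =====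
theorem solve_spec : Claim_equal_solve := by
  intro N _ hpre
  unfold Spec_solve solve solve_alt
  by_cases hm : PySem.Int.mod N 2 = 0
  · have h2 : (2 : Int) ∣ N := by
      have := PySem.Int.mod_eq_zero_iff_dvd N 2
      tauto
    have hN : 0 ≤ N := by
      rcases hpre with h | h
      · exact absurd h2 h
      · exact h
    simp only [hm, ne_eq, not_true_eq_false, if_false]
    have hlt : N < 10 * 5 ^ N.natAbs := by
      have h1 : (N.natAbs : Int) < (5 : Int) ^ N.natAbs := by
        exact_mod_cast nat_lt_pow5 N.natAbs
      have h2' : N = (N.natAbs : Int) := by omega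
      calc N = (N.natAbs : Int) := h2'
        _ < 5 ^ N.natAbs := h1
        _ ≤ 10 * 5 ^ N.natAbs := by nlinarith [pow_pos (by norm_num : (0:Int) < 5) N.natAbs]
    rw [solveLoop_eq N.natAbs N 0 10 hN (by norm_num) hlt]
    have hhalf : 0 < PySem.Int.floordiv N 2 ∨ PySem.Int.floordiv N 2 = 0 := by
      have : 0 ≤ PySem.Int.floordiv N 2 := by
        rw [PySem.Int.floordiv_eq_ediv_of_pos (by norm_num)]
        exact Int.ediv_nonneg hN (by norm_num)
      omega
    rcases hhalf with hpos | hz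
    · rw [fives_pos _ hpos, floordiv_floordiv N 2 5 (by norm_num) (by norm_num)]
      norm_num
    · have h10 : PySem.Int.floordiv N 10 = 0 := by
        have h := floordiv_floordiv N 2 5 (by norm_num) (by norm_num)
        rw [hz] at h
        norm_num at h
        rw [PySem.Int.floordiv_eq_ediv_of_pos (by norm_num : (0:Int) < 10)]
        omega
      rw [h10, hz, fives_zero]
      ring
  · rw [if_pos hm, if_pos hm]
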